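-- pv_equiv track=rewrite | github.com/tquintard/AoC_2024 | modules/Day_8.py | calc_partial_result
-- ===== SOURCE A (Python) =====
-- from typing import List, Tuple, Callable
--
-- OPS: List[Callable[[List[int]], int]] = [
--     lambda nums: nums[0] + nums[1],  # Example: addition
--     lambda nums: nums[0] - nums[1],  # Example: subtraction
--     lambda nums: nums[0] * nums[1],  # Example: multiplication
--     # Add other operations as necessary
-- ]
--
-- def calc_partial_result(result: int, operands: List[int], part: int) -> bool:
--     """
--     Recursively checks if the operands can be combined using the allowed
--     operations up to the given part to produce the target result.
--
--     Args:
--         result (int): Target result to achieve.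
--         operands (List[int]): List of integers to combine.
--         part (int): Maximum index of operations to consider from OPS.
--
--     Returns:
--         bool: True if the result can be achieved, False otherwise.
--     """
--     # Base case: If only one operand is left, check if it matches the result
--     if len(operands) == 1:
--         return operands[0] == result
--
--     # Try all operations from OPS up to the given part
--     for op in OPS[:part + 1]:
--         # Apply the operation on the first two operands and recurse
--         new_operands = [op(operands[:2])] + operands[2:]
--         if calc_partial_result(result, new_operands, part):
--             return True
--
--     # If no operation leads to the result, return False
--     return False
-- ===== SOURCE B (Python) =====
-- from typing import List, Tuple, Callable
--
-- OPS: List[Callable[[List[int]], int]] = [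
--     lambda nums: nums[0] + nums[1],
--     lambda nums: nums[0] - nums[1],
--     lambda nums: nums[0] * nums[1],
-- ]
--
-- def calc_partial_result(result: int, operands: List[int], part: int) -> bool:
--     """Iterative reachability: maintain the set of all left-fold partial results."""
--     values = {operands[0]}
--     ops = OPS[:part + 1]
--     for x in operands[1:]:
--         values = {op([v, x]) for v in values for op in ops}
--     return result in values
-- ===== Notes on version B (the rewrite author's own statement) =====
-- stated objective: alternative
-- what changed: Replaced the depth-first recursion over all operator choices by an iterative left-to-right fold that maintains the deduplicated set of all reachable partial results and checks membership of the target at the end.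
-- outside the precondition, e.g. on calc_partial_result(5, [], -1): A returns False, B raises IndexError
import Mathlib
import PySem

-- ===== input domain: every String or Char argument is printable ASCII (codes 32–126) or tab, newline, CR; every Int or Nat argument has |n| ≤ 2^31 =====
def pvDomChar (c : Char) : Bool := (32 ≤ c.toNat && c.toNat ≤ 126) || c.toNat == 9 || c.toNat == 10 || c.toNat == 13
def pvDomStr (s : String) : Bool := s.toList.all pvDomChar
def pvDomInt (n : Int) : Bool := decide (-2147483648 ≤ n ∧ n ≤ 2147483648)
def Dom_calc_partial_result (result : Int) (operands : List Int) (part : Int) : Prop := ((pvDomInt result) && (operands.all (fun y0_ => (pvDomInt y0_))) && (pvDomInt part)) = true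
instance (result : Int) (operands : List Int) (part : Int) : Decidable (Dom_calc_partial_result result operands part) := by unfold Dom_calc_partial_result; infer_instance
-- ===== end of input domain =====

-- B replaces A's exponential depth-first recursion over operator choices by an
-- iterative fold maintaining the set of all reachable partial results (same boolean answer).


-- ===== PORT A =====
-- module constant OPS (each Python lambda takes the first two operands)
def pvOPS : List (Int → Int → Int) := [fun a b => a + b, fun a b => a - b, fun a b => a * b]

-- literal port of A; the [] case (Python raises IndexError, or returns False on an empty
-- op slice) is excluded by Pre_ and only makes the recursion total
def calc_partial_result (result : Int) (operands : List Int) (part : Int) : Bool :=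
  match operands with
  | [] => false
  | [x] => decide (x = result)
  | a :: b :: rest =>
      (PySem.List.slice pvOPS none (some (part + 1))).any (fun op =>
        calc_partial_result result (op a b :: rest) part)
termination_by operands.length

-- ===== PORT B =====
-- literal port of Source B; the [] case (Python raises IndexError on operands[0]) is excluded by Pre_
def calc_partial_result_alt (result : Int) (operands : List Int) (part : Int) : Bool :=
  match operands with
  | [] => false
  | x :: xs =>
      let ops := PySem.List.slice pvOPS none (some (part + 1))
      let values := xs.foldl
        (fun vals y => PySem.Set.ofList (vals.flatMap (fun v => ops.map (fun op => op v y))))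
        (PySem.Set.ofList [x])
      PySem.Set.contains values result

-- ===== PRECONDITION & SPEC =====
-- Pre_ excludes empty operand lists: A raises IndexError on them for most `part` values
-- (returning False only when the op slice is empty, e.g. part = -1), and B's natural
-- algorithm raises IndexError on them for every `part`.
def Pre_calc_partial_result (result : Int) (operands : List Int) (part : Int) : Prop := operands ≠ []
instance (result : Int) (operands : List Int) (part : Int) : Decidable (Pre_calc_partial_result result operands part) := by unfold Pre_calc_partial_result; infer_instance

def pvWitness_calc_partial_result : Int × List Int × Int := (29, [2, 3, 5, 4], 2)

def Spec_calc_partial_result (result : Int) (operands : List Int) (part : Int) (out : Bool) : Prop := out = calc_partial_result_alt result operands part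
instance (result : Int) (operands : List Int) (part : Int) (out : Bool) : Decidable (Spec_calc_partial_result result operands part out) := by unfold Spec_calc_partial_result; infer_instance

-- ===== CLAIM (what is proved, stated in full; the proofs are below) =====
def Claim_equal_calc_partial_result : Prop := ∀ (result : Int) (operands : List Int) (part : Int), Dom_calc_partial_result result operands part → Pre_calc_partial_result result operands part → Spec_calc_partial_result result operands part (calc_partial_result result operands part)

-- ===== LEMMAS AND PROOFS =====

-- A's result on v :: xs, as the existence of a reachable fold value, equals membership
-- of `result` in B's fold set started from any seed set S containing exactly those v.
theorem pv_fold_any (result part : Int) (xs : List Int) : ∀ (S : List Int),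
    (PySem.Set.contains
      (xs.foldl (fun vals y => PySem.Set.ofList (vals.flatMap (fun v =>
          (PySem.List.slice pvOPS none (some (part + 1))).map (fun op => op v y)))) S)
      result)
    = S.any (fun v => calc_partial_result result (v :: xs) part) := by
  induction xs with
  | nil =>
      intro S
      simp only [calc_partial_result, List.foldl_nil, PySem.Set.contains]
      rw [Bool.eq_iff_iff]
      simp only [List.any_eq_true, decide_eq_true_eq, List.contains_iff_mem]
      exact ⟨fun h => ⟨result, h, rfl⟩, fun ⟨v, hv, e⟩ => e ▸ hv⟩
  | cons y ys ih =>
      intro S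
      simp only [List.foldl_cons]
      rw [ih]
      have : ∀ v, calc_partial_result result (v :: y :: ys) part
          = (PySem.List.slice pvOPS none (some (part + 1))).any (fun op =>
              calc_partial_result result (op v y :: ys) part) := by
        intro v; rw [calc_partial_result]
      simp only [this]
      rw [Bool.eq_iff_iff]
      simp only [List.any_eq_true]
      constructor
      · rintro ⟨z, hz, hf⟩
        rw [PySem.Set.mem_ofList, List.mem_flatMap] at hz
        obtain ⟨v, hv, hz⟩ := hz
        rw [List.mem_map] at hz
        obtain ⟨op, hop, rfl⟩ := hz
        exact ⟨v, hv, op, hop, hf⟩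
      · rintro ⟨v, hv, op, hop, hf⟩
        refine ⟨op v y, ?_, hf⟩
        rw [PySem.Set.mem_ofList, List.mem_flatMap]
        exact ⟨v, hv, List.mem_map_of_mem hop⟩

-- ===== VERDICT (by name: the statement is the Claim_ definition above) =====
theorem calc_partial_result_spec : Claim_equal_calc_partial_result := by
  intro result operands part _ hpre
  unfold Spec_calc_partial_result
  match operands with
  | [] => exact absurd rfl hpre
  | x :: xs =>
      show calc_partial_result result (x :: xs) part = _
      simp only [calc_partial_result_alt]
      rw [pv_fold_any, PySem.Set.ofList_eq_self_of_nodup [x] (List.nodup_singleton x)]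
      simp
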